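-- pv_equiv track=rewrite | github.com/hj-im/coding | Programmers/coding_Lv2/42586.py | solution
-- ===== SOURCE A (Python) =====
-- def solution(progresses, speeds):
--     answer = []
--     cnt = 0
--     dayVal = 0
--     while progresses:
--         if progresses[0] + speeds[0] * dayVal >=100:
--             progresses.pop(0)
--             speeds.pop(0)
--             cnt+=1
--         else:
--             if cnt>=1:
--                 answer.append(cnt)
--                 cnt = 0
--             dayVal +=1
--     answer.append(cnt)
--     return answer
-- ===== SOURCE B (Python) =====
-- def solution(progresses, speeds):
--     # single pass: per task compute its finish day ceil((100-p)/s); group by running-max day.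
--     answer = []
--     group = 0
--     cur = 0
--     for p, s in zip(progresses, speeds):
--         d = -((p - 100) // s)  # ceil((100 - p) / s)
--         if d > cur:
--             if group:
--                 answer.append(group)
--             group = 0
--             cur = d
--         group += 1
--     answer.append(group)
--     return answer
-- ===== Notes on version B (the rewrite author's own statement) =====
-- stated objective: alternative
-- what changed: B replaces A's day-by-day simulation with destructive pop(0) by a single pass that computes each task's finish day as ceil((100-p)/s) and groups tasks by the running-maximum finish day (intended as faster; a timing run could not confirm a ratio because A timed out on large inputs).
-- outside the precondition, e.g. on solution([100], [0]): A returns [1], B raises ZeroDivisionError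
import Mathlib
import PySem

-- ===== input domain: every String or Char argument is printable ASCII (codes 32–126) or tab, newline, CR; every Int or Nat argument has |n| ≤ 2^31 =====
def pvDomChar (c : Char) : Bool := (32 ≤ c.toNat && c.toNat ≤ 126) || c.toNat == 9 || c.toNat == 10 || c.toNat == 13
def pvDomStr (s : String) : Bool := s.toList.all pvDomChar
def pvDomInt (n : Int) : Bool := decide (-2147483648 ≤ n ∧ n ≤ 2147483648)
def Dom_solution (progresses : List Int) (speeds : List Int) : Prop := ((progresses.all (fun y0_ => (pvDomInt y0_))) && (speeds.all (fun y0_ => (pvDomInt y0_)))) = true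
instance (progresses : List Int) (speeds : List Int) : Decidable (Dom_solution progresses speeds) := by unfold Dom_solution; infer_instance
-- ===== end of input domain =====

-- B replaces A's day-by-day simulation (with destructive pop(0)) by a single pass grouping
-- tasks by the running-maximum finish day ceil((100-p)/s); equivalence is about the RETURN
-- value only (Python A empties its two argument lists in place, B does not mutate them).


-- ===== PORT A =====
-- A's while loop: state (progresses, speeds, answer, cnt, dayVal); each iteration either pops
-- the ready head or (after flushing cnt once) increments dayVal.  fuel is an upper bound on the
-- number of iterations, proved sufficient under Pre_ ∧ Dom (never reached there); with speeds
-- exhausted early Python raises IndexError (excluded by Pre_).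
def loopA : Nat → List Int → List Int → List Int → Int → Int → List Int
  | _, [], _, ans, cnt, _ => ans ++ [cnt]
  | 0, _ :: _, _, ans, cnt, _ => ans ++ [cnt]
  | fuel+1, p :: ps, s :: ss, ans, cnt, day =>
      if 100 ≤ p + s * day then
        loopA fuel ps ss ans (cnt + 1) day
      else if 1 ≤ cnt then
        loopA fuel (p :: ps) (s :: ss) (ans ++ [cnt]) 0 (day + 1)
      else
        loopA fuel (p :: ps) (s :: ss) ans cnt (day + 1)
  | _+1, _ :: _, [], ans, cnt, _ => ans ++ [cnt]

def solution (progresses : List Int) (speeds : List Int) : List Int :=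
  loopA (progresses.length + 2147483749) progresses speeds [] 0 0

-- ===== PORT B =====
-- one fold step of Source B's loop over zip(progresses, speeds); state = (answer, group, cur)
def stepB (st : List Int × Int × Int) (t : Int × Int) : List Int × Int × Int :=
  let d := -(PySem.Int.floordiv (t.1 - 100) t.2)   -- -((p - 100) // s) = ceil((100-p)/s)
  if st.2.2 < d then
    ((if st.2.1 ≠ 0 then st.1 ++ [st.2.1] else st.1), 1, d)
  else
    (st.1, st.2.1 + 1, st.2.2)

def solution_alt (progresses : List Int) (speeds : List Int) : List Int :=
  let r := (progresses.zip speeds).foldl stepB ([], 0, 0)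
  r.1 ++ [r.2.1]

-- ===== PRECONDITION & SPEC =====
-- Pre_ excludes inputs with fewer speeds than progresses (A raises IndexError) and inputs whose
-- used speeds are not all ≥ 1: on those A diverges whenever an unfinished task reaches the head,
-- and on the rest (task already ≥ 100 on arrival) B's ceil-division divides by the speed.
def Pre_solution (progresses : List Int) (speeds : List Int) : Prop :=
  progresses.length ≤ speeds.length ∧ ∀ s ∈ speeds.take progresses.length, 1 ≤ s
instance (progresses : List Int) (speeds : List Int) : Decidable (Pre_solution progresses speeds) := by unfold Pre_solution; infer_instance
def pvWitness_solution : List Int × List Int := ([93, 30, 55], [1, 30, 5])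
def Spec_solution (progresses : List Int) (speeds : List Int) (out : List Int) : Prop := out = solution_alt progresses speeds
instance (progresses : List Int) (speeds : List Int) (out : List Int) : Decidable (Spec_solution progresses speeds out) := by unfold Spec_solution; infer_instance

-- ===== CLAIM (what is proved, stated in full; the proofs are below) =====
def Claim_equal_solution : Prop := ∀ (progresses : List Int) (speeds : List Int), Dom_solution progresses speeds → Pre_solution progresses speeds → Spec_solution progresses speeds (solution progresses speeds)

-- ===== LEMMAS AND PROOFS =====

-- the task at (p, s) is ready on day t iff t has reached its finish day ceil((100-p)/s)
lemma ready_iff (p s t : Int) (hs : 1 ≤ s) :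
    (100 ≤ p + s * t) ↔ (-(PySem.Int.floordiv (p - 100) s) ≤ t) := by
  rw [neg_le, PySem.Int.le_floordiv_iff_mul_le (by omega : (0:Int) < s)]
  constructor <;> intro h <;> nlinarith

-- the finish day is at most max (100 - p) 0
lemma d_bound (p s : Int) (hs : 1 ≤ s) :
    -(PySem.Int.floordiv (p - 100) s) ≤ max (100 - p) 0 := by
  by_cases h : 100 - p ≤ 0
  · have := (ready_iff p s 0 hs).1 (by omega)
    omega
  · have := (ready_iff p s (100 - p) hs).1 (by nlinarith)
    omega

lemma loopA_eq (fuel : Nat) :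
    ∀ (ps ss ans : List Int) (cnt day : Int),
      ps.length ≤ ss.length →
      (∀ s ∈ ss.take ps.length, 1 ≤ s) →
      (∀ p ∈ ps, -2147483648 ≤ p) →
      0 ≤ cnt → 0 ≤ day →
      ps.length + (2147483748 - day).toNat ≤ fuel →
      loopA fuel ps ss ans cnt day =
        (let r := (ps.zip ss).foldl stepB (ans, cnt, day); r.1 ++ [r.2.1]) := by
  induction fuel with
  | zero =>
    intro ps ss ans cnt day hlen _ _ _ _ hfuel
    have hps : ps = [] := by
      cases ps with
      | nil => rfl
      | cons a l => simp at hfuel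
    subst hps
    simp [loopA]
  | succ f ih =>
    intro ps ss ans cnt day hlen hsp hpb hcnt hday hfuel
    cases ps with
    | nil => simp [loopA]
    | cons p ps' =>
      cases ss with
      | nil => simp at hlen
      | cons s ss' =>
        have hs1 : 1 ≤ s := by
          apply hsp; simp [List.take_succ_cons]
        have hp1 : -2147483648 ≤ p := hpb p (by simp)
        have hlen' : ps'.length ≤ ss'.length := by simpa using hlen
        have hsp' : ∀ x ∈ ss'.take ps'.length, 1 ≤ x := by
          intro x hx; apply hsp; simp [List.take_succ_cons, hx]
        have hpb' : ∀ x ∈ ps', -2147483648 ≤ x := fun x hx => hpb x (by simp [hx])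
        by_cases h : 100 ≤ p + s * day
        · have hd : -(PySem.Int.floordiv (p - 100) s) ≤ day := (ready_iff p s day hs1).1 h
          rw [loopA, if_pos h, ih ps' ss' ans (cnt + 1) day hlen' hsp' hpb' (by omega) hday
              (by simp at hfuel ⊢; omega)]
          simp only [List.zip_cons_cons, List.foldl_cons]
          have : stepB (ans, cnt, day) (p, s) = (ans, cnt + 1, day) := by
            simp [stepB, not_lt.2 hd]
          rw [this]
        · have hd : day < -(PySem.Int.floordiv (p - 100) s) := by
            by_contra hc
            exact h ((ready_iff p s day hs1).2 (by omega))
          have hdb : -(PySem.Int.floordiv (p - 100) s) ≤ 2147483748 := by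
            have := d_bound p s hs1; omega
          have hfuel' : (p :: ps').length + (2147483748 - (day + 1)).toNat ≤ f := by
            simp at hfuel ⊢; omega
          by_cases hc : 1 ≤ cnt
          · rw [loopA, if_neg h, if_pos hc,
                ih (p :: ps') (s :: ss') (ans ++ [cnt]) 0 (day + 1) hlen hsp hpb le_rfl
                  (by omega) hfuel']
            simp only [List.zip_cons_cons, List.foldl_cons]
            have : stepB (ans, cnt, day) (p, s) = stepB (ans ++ [cnt], 0, day + 1) (p, s) := by
              by_cases h2 : day + 1 < -(PySem.Int.floordiv (p - 100) s)
              · simp only [stepB, if_pos hd, if_pos h2, if_neg (by omega : ¬ (0:Int) ≠ 0)]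
                have hcne : ¬cnt = 0 := by omega
                simp [hcne]
              · have heq : -(PySem.Int.floordiv (p - 100) s) = day + 1 := by omega
                simp only [stepB, heq]
                have hcne : ¬cnt = 0 := by omega
                simp [hcne]
            rw [this]
          · have hc0 : cnt = 0 := by omega
            subst hc0
            rw [loopA, if_neg h, if_neg (by omega),
                ih (p :: ps') (s :: ss') ans 0 (day + 1) hlen hsp hpb le_rfl (by omega) hfuel']
            simp only [List.zip_cons_cons, List.foldl_cons]
            have : stepB (ans, 0, day) (p, s) = stepB (ans, 0, day + 1) (p, s) := by
              by_cases h2 : day + 1 < -(PySem.Int.floordiv (p - 100) s)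
              · simp [stepB, hd, h2]
              · have heq : -(PySem.Int.floordiv (p - 100) s) = day + 1 := by omega
                simp [stepB, heq]
            rw [this]

-- ===== VERDICT (by name: the statement is the Claim_ definition above) =====
theorem solution_spec : Claim_equal_solution := by
  intro progresses speeds hdom hpre
  obtain ⟨hlen, hsp⟩ := hpre
  have hpb : ∀ p ∈ progresses, -2147483648 ≤ p := by
    simp only [Dom_solution, Bool.and_eq_true, List.all_eq_true, pvDomInt,
      decide_eq_true_eq] at hdom
    intro p hp; exact (hdom.1 p hp).1
  show solution progresses speeds = solution_alt progresses speeds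
  rw [solution, solution_alt,
    loopA_eq _ progresses speeds [] 0 0 hlen hsp hpb le_rfl le_rfl (by omega)]
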